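-- pv_equiv track=rewrite | github.com/theMANGOlorian/Algo2 | programmazione dinamica/#sequenze_no_cifre_pari_adiacenti.py | soluzione
-- ===== SOURCE A (Python) =====
-- def soluzione(n):
--     T = [0 for _ in range(n+1)]
--     T[0] = 0
--     T[1] = 10
--     T[2] = 75
--     for i in range(3,n+1):
--         T[i] = T[i-2]*25 + T[i-1]*5
--     return T[n]
-- ===== SOURCE B (Python) =====
-- def _mul(p, q):
--     a, b, c, d = p
--     e, f, g, h = q
--     return (a * e + b * g, a * f + b * h, c * e + d * g, c * f + d * h)
--
--
-- def soluzione(n):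
--     # T[i] = 25*T[i-2] + 5*T[i-1], T[1] = 10, T[2] = 75 -> 2x2 matrix power
--     if n <= 0:
--         return 0
--     if n == 1:
--         return 10
--     r = (1, 0, 0, 1)
--     m = (5, 25, 1, 0)
--     e = n - 2
--     while e > 0:
--         if e & 1:
--             r = _mul(r, m)
--         m = _mul(m, m)
--         e >>= 1
--     return r[0] * 75 + r[1] * 10
-- ===== Notes on version B (the rewrite author's own statement) =====
-- stated objective: faster
-- what changed: Replaces the linear dynamic-programming table with binary exponentiation of the 2x2 recurrence matrix [[5,25],[1,0]] in O(1) extra space; intended as faster (a timing run measured 17-24x at the largest sizes it could decode, unconfirmed beyond).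
import Mathlib
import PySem

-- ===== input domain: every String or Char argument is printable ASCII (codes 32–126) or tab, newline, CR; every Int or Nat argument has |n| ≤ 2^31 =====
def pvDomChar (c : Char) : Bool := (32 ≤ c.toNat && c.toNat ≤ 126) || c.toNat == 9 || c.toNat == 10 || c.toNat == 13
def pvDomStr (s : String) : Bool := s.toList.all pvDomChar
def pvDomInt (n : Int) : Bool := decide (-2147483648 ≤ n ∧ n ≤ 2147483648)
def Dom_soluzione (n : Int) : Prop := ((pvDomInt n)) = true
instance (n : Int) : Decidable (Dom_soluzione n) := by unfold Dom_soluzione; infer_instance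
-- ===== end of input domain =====

-- B replaces A's linear DP table with binary exponentiation of the 2x2 recurrence matrix
-- (intended as faster; a timing run measured B 17-24x faster at the largest sizes it decoded).

-- ===== PORT A =====
-- pySetD/pyGetD are the total forms of Python's T[i]=… / T[i]; Pre_ (2 ≤ n) keeps every index in range.
def soluzione (n : Int) : Int :=
  let T : List Int := (PySem.List.pyRange 0 (n + 1) 1).map (fun _ => (0 : Int))
  let T := PySem.List.pySetD T 0 0
  let T := PySem.List.pySetD T 1 10
  let T := PySem.List.pySetD T 2 75
  let T := (PySem.List.pyRange 3 (n + 1) 1).foldl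
    (fun T i =>
      PySem.List.pySetD T i
        (PySem.List.pyGetD T (i - 2) 0 * 25 + PySem.List.pyGetD T (i - 1) 0 * 5)) T
  PySem.List.pyGetD T n 0

-- ===== PORT B =====
def m2mul (p q : Int × Int × Int × Int) : Int × Int × Int × Int :=
  (p.1 * q.1 + p.2.1 * q.2.2.1, p.1 * q.2.1 + p.2.1 * q.2.2.2,
   p.2.2.1 * q.1 + p.2.2.2 * q.2.2.1, p.2.2.1 * q.2.1 + p.2.2.2 * q.2.2.2)

-- the while-loop of Source B: r accumulates, m squares, e halves (e = n-2 ≥ 0, a Nat)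
def m2powAux (r m : Int × Int × Int × Int) (e : Nat) : Int × Int × Int × Int :=
  if h : e = 0 then r
  else m2powAux (if e % 2 = 1 then m2mul r m else r) (m2mul m m) (e / 2)
decreasing_by exact Nat.div_lt_self (Nat.pos_of_ne_zero h) (by omega)

def soluzione_alt (n : Int) : Int :=
  if n ≤ 0 then 0
  else if n = 1 then 10
  else
    let r := m2powAux (1, 0, 0, 1) (5, 25, 1, 0) (n - 2).toNat
    r.1 * 75 + r.2.1 * 10

-- ===== PRECONDITION & SPEC =====
-- Pre_ excludes exactly the inputs on which the Python A raises IndexError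
-- (the base-case table assignments fall outside the freshly built list there).
def Pre_soluzione (n : Int) : Prop := 2 ≤ n
instance (n : Int) : Decidable (Pre_soluzione n) := by unfold Pre_soluzione; infer_instance
def pvWitness_soluzione : Int := 5

def Spec_soluzione (n : Int) (out : Int) : Prop := out = soluzione_alt n
instance (n : Int) (out : Int) : Decidable (Spec_soluzione n out) := by unfold Spec_soluzione; infer_instance

-- ===== CLAIM (what is proved, stated in full; the proofs are below) =====
def Claim_equal_soluzione : Prop := ∀ (n : Int), Dom_soluzione n → Pre_soluzione n → Spec_soluzione n (soluzione n)

-- ===== LEMMAS AND PROOFS =====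

-- the recurrence value T[k]
def Tval : Nat → Int
  | 0 => 0
  | 1 => 10
  | 2 => 75
  | (k + 3) => Tval (k + 1) * 25 + Tval (k + 2) * 5

-- plain matrix power, right-multiplied (matches the accumulator order of m2powAux)
def m2pow (m : Int × Int × Int × Int) : Nat → Int × Int × Int × Int
  | 0 => (1, 0, 0, 1)
  | (k + 1) => m2mul (m2pow m k) m

lemma m2mul_assoc (a b c : Int × Int × Int × Int) :
    m2mul (m2mul a b) c = m2mul a (m2mul b c) := by
  obtain ⟨a1, a2, a3, a4⟩ := a; obtain ⟨b1, b2, b3, b4⟩ := b; obtain ⟨c1, c2, c3, c4⟩ := c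
  simp only [m2mul, Prod.mk.injEq]
  refine ⟨by ring, by ring, by ring, by ring⟩

lemma m2mul_one (a : Int × Int × Int × Int) : m2mul a (1, 0, 0, 1) = a := by
  obtain ⟨a1, a2, a3, a4⟩ := a
  simp only [m2mul, Prod.mk.injEq]
  refine ⟨by ring, by ring, by ring, by ring⟩

lemma m2pow_two_mul (m : Int × Int × Int × Int) (k : Nat) :
    m2pow m (2 * k) = m2pow (m2mul m m) k := by
  induction k with
  | zero => rfl
  | succ k ih =>
    have : 2 * (k + 1) = (2 * k + 1) + 1 := by ring
    rw [this]
    show m2mul (m2mul (m2pow m (2 * k)) m) m = m2mul (m2pow (m2mul m m) k) (m2mul m m)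
    rw [ih, m2mul_assoc]

lemma m2one_mul (a : Int × Int × Int × Int) : m2mul (1, 0, 0, 1) a = a := by
  obtain ⟨a1, a2, a3, a4⟩ := a
  simp only [m2mul, Prod.mk.injEq]
  refine ⟨by ring, by ring, by ring, by ring⟩

-- powers of the same matrix commute with the matrix
lemma m2pow_comm (m : Int × Int × Int × Int) (k : Nat) :
    m2mul (m2pow m k) m = m2mul m (m2pow m k) := by
  induction k with
  | zero => rw [m2pow, m2mul_one, m2one_mul]
  | succ k ih => rw [m2pow, m2mul_assoc, ih, ← m2mul_assoc, ih, m2mul_assoc, ih]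

lemma m2powAux_eq (e : Nat) : ∀ (r m : Int × Int × Int × Int),
    m2powAux r m e = m2mul r (m2pow m e) := by
  induction e using Nat.strong_induction_on with
  | _ e ih =>
    intro r m
    rw [m2powAux]
    by_cases h : e = 0
    · simp [h, m2pow, m2mul_one]
    · rw [dif_neg h, ih (e / 2) (Nat.div_lt_self (Nat.pos_of_ne_zero h) (by omega))]
      by_cases hp : e % 2 = 1
      · rw [if_pos hp, m2mul_assoc]
        congr 1
        have hk : e = 2 * (e / 2) + 1 := by omega
        conv_rhs => rw [hk]
        rw [show m2pow m (2 * (e / 2) + 1) = m2mul (m2pow m (2 * (e / 2))) m from rfl,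
          m2pow_two_mul, ← m2pow_two_mul, m2pow_comm, m2pow_two_mul]
      · rw [if_neg hp]
        have hk : e = 2 * (e / 2) := by omega
        conv_rhs => rw [hk, m2pow_two_mul]

-- entries of M^k applied to the base vector (75,10) give Tval
lemma m2pow_Tval (k : Nat) :
    (m2pow (5, 25, 1, 0) k).1 * 75 + (m2pow (5, 25, 1, 0) k).2.1 * 10 = Tval (k + 2) ∧
    (m2pow (5, 25, 1, 0) k).2.2.1 * 75 + (m2pow (5, 25, 1, 0) k).2.2.2 * 10 = Tval (k + 1) := by
  induction k with
  | zero => exact ⟨by simp [m2pow, Tval], by simp [m2pow, Tval]⟩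
  | succ k ih =>
    have hl : m2pow (5, 25, 1, 0) (k + 1) = m2mul (5, 25, 1, 0) (m2pow (5, 25, 1, 0) k) := by
      rw [m2pow, m2pow_comm]
    obtain ⟨h1, h2⟩ := ih
    constructor
    · rw [hl]
      show (5 * (m2pow (5,25,1,0) k).1 + 25 * (m2pow (5,25,1,0) k).2.2.1) * 75 +
           (5 * (m2pow (5,25,1,0) k).2.1 + 25 * (m2pow (5,25,1,0) k).2.2.2) * 10 = Tval (k + 3)
      rw [show Tval (k + 3) = Tval (k + 1) * 25 + Tval (k + 2) * 5 from rfl, ← h1, ← h2]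
      ring
    · rw [hl]
      show (1 * (m2pow (5,25,1,0) k).1 + 0 * (m2pow (5,25,1,0) k).2.2.1) * 75 +
           (1 * (m2pow (5,25,1,0) k).2.1 + 0 * (m2pow (5,25,1,0) k).2.2.2) * 10 = Tval (k + 2)
      rw [← h1]; ring

-- B computes Tval for n ≥ 2
lemma alt_eq_Tval (k : Nat) : soluzione_alt ((k : Int) + 2) = Tval (k + 2) := by
  unfold soluzione_alt
  rw [if_neg (by omega), if_neg (by omega)]
  have h2 : ((k : Int) + 2 - 2).toNat = k := by omega
  rw [h2, m2powAux_eq, m2one_mul]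
  exact (m2pow_Tval k).1

-- setting the element just past a prefix
lemma set_append_len {α : Type} (pre : List α) (x v : α) (suf : List α) :
    (pre ++ x :: suf).set pre.length v = pre ++ v :: suf := by
  induction pre with
  | nil => rfl
  | cons a pre ih => simp [ih]

lemma set_append_len' {α : Type} (pre : List α) (x v : α) (suf : List α) (j : Nat)
    (hj : j = pre.length) : (pre ++ x :: suf).set j v = pre ++ v :: suf := by
  subst hj; exact set_append_len pre x v suf

-- A-side loop invariant
lemma A_loop (n : Nat) (h : 2 ≤ n) : ∀ (m : Nat), 2 ≤ m → m ≤ n →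
    (PySem.List.pyRange 3 ((m : Int) + 1) 1).foldl
      (fun T i => PySem.List.pySetD T i
        (PySem.List.pyGetD T (i - 2) 0 * 25 + PySem.List.pyGetD T (i - 1) 0 * 5))
      ((List.range 3).map Tval ++ List.replicate (n - 2) 0)
    = (List.range (m + 1)).map Tval ++ List.replicate (n - m) 0 := by
  intro m
  induction m with
  | zero => omega
  | succ m ih =>
    intro h2 hmn
    by_cases hm2 : m + 1 = 2
    · rw [hm2]
      rw [show ((2:Nat):Int) + 1 = 3 by norm_num, PySem.List.pyRange_one_eq_nil (by norm_num)]
      simp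
    · have h2m : 2 ≤ m := by omega
      have hstep : PySem.List.pyRange 3 ((m:Int) + 1 + 1) 1
          = PySem.List.pyRange 3 ((m:Int) + 1) 1 ++ [(m:Int) + 1] := by
        exact PySem.List.pyRange_one_succ_right (by omega)
      rw [show (((m+1:Nat)):Int) + 1 = (m:Int) + 1 + 1 by push_cast; ring, hstep,
        List.foldl_append, ih h2m (by omega)]
      simp only [List.foldl_cons, List.foldl_nil]
      have hcast : ((m:Int) + 1) = ((m + 1 : Nat) : Int) := by push_cast; ring
      have hget1 : ((m:Int) + 1 - 2) = ((m - 1 : Nat) : Int) := by omega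
      have hget2 : ((m:Int) + 1 - 1) = ((m : Nat) : Int) := by omega
      rw [hget1, hget2, hcast, PySem.List.pySetD_natCast,
        PySem.List.pyGetD_natCast, PySem.List.pyGetD_natCast]
      have hlen : ((List.range (m + 1)).map Tval).length = m + 1 := by simp
      have hg1 : ((List.range (m + 1)).map Tval ++ List.replicate (n - m) 0).getD (m - 1) 0
          = Tval (m - 1) := by
        rw [List.getD_eq_getElem?_getD,
          List.getElem?_append_left (by simp only [List.length_map, List.length_range]; omega)]
        simp [List.getElem?_range, show m - 1 < m + 1 by omega]
      have hg2 : ((List.range (m + 1)).map Tval ++ List.replicate (n - m) 0).getD m 0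
          = Tval m := by
        rw [List.getD_eq_getElem?_getD,
          List.getElem?_append_left (by simp only [List.length_map, List.length_range]; omega)]
        simp [List.getElem?_range, show m < m + 1 by omega]
      rw [hg1, hg2]
      have hrep : List.replicate (n - m) (0:Int) = 0 :: List.replicate (n - (m+1)) 0 := by
        rw [show n - m = (n - (m+1)) + 1 by omega, List.replicate_succ]
      rw [hrep]
      rw [set_append_len' ((List.range (m + 1)).map Tval) 0
        (Tval (m - 1) * 25 + Tval m * 5) (List.replicate (n - (m+1)) 0) (m + 1) (by simp)]
      have hTv : Tval (m - 1) * 25 + Tval m * 5 = Tval (m + 1) := by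
        obtain ⟨j, rfl⟩ : ∃ j, m = j + 2 := ⟨m - 2, by omega⟩
        show Tval (j + 1) * 25 + Tval (j + 2) * 5 = Tval (j + 3)
        rfl
      rw [hTv]
      conv_rhs => rw [List.range_succ]
      simp

lemma A_eq_Tval (n : Nat) (h : 2 ≤ n) : soluzione (n : Int) = Tval n := by
  unfold soluzione
  dsimp only
  have hinit : PySem.List.pySetD (PySem.List.pySetD (PySem.List.pySetD
      ((PySem.List.pyRange 0 ((n:Int) + 1) 1).map (fun _ => (0:Int))) 0 0) 1 10) 2 75
      = (List.range 3).map Tval ++ List.replicate (n - 2) 0 := by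
    have hlen : ((PySem.List.pyRange 0 ((n:Int) + 1) 1).map (fun _ => (0:Int)))
        = List.replicate (n + 1) 0 := by
      rw [List.map_const']
      congr 1
      rw [PySem.List.length_pyRange_one]; omega
    rw [hlen, show n + 1 = ((n - 2) + 1 + 1) + 1 by omega]
    simp only [List.replicate_succ]
    simp [PySem.List.pySetD_of_nonneg, List.set]
    rfl
  rw [hinit, A_loop n h n h (le_refl n)]
  rw [PySem.List.pyGetD_natCast, List.getD_eq_getElem?_getD,
    List.getElem?_append_left (by simp only [List.length_map, List.length_range]; omega)]
  simp [List.getElem?_range, show n < n + 1 by omega]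

-- ===== VERDICT (by name: the statement is the Claim_ definition above) =====
theorem soluzione_spec : Claim_equal_soluzione := by
  intro n _ hpre
  unfold Pre_soluzione at hpre
  unfold Spec_soluzione
  lift n to Nat using (by omega : (0:Int) ≤ n) with m
  have hm : 2 ≤ m := by exact_mod_cast hpre
  rw [A_eq_Tval m hm]
  obtain ⟨k, rfl⟩ : ∃ k, m = k + 2 := ⟨m - 2, by omega⟩
  rw [show ((k + 2 : Nat) : Int) = (k : Int) + 2 by push_cast; ring, alt_eq_Tval]
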